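-- pv_equiv track=rewrite | github.com/plavez/Computer-Science | hash_table_003.py | search_and_remove_2
-- ===== SOURCE A (Python) =====
-- def search_and_remove_2(a_string):
--     a_list = a_string.split()
--     seen = set()
--
--     for index, word in enumerate(a_list):
--         cleaned = word
--         if cleaned in seen:
--             del a_list[index]
--             return ' '.join(a_list)
--         seen.add(cleaned)
--     return a_string
-- ===== SOURCE B (Python) =====
-- def search_and_remove_2(a_string):
--     # Staged: collect all positions whose word already occurred (index(w) != i), then delete at the minimal one.
--     words = a_string.split()
--     dups = [i for i, w in enumerate(words) if words.index(w) != i]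
--     if not dups:
--         return a_string
--     i = min(dups)
--     return ' '.join(words[:i] + words[i + 1:])
-- ===== Notes on version B (the rewrite author's own statement) =====
-- stated objective: alternative
-- what changed: Replaces A's early-exit single pass with a growing seen-set by a staged computation: a comprehension collects ALL positions whose word already occurred (words.index(w) != i), then the deletion position is min() of that list and the result is built from the two slices around it; no set and no early return.
import Mathlib
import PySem

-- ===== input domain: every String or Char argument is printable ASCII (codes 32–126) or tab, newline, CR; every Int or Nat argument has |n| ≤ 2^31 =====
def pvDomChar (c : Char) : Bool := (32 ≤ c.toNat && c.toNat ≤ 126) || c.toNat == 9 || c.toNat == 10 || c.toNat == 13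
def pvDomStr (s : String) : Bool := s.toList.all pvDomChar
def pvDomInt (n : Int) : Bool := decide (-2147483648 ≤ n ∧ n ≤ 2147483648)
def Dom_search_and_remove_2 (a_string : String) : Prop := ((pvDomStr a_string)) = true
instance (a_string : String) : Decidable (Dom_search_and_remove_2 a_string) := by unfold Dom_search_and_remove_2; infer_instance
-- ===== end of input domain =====

-- B replaces A's early-exit seen-set scan by a staged computation: collect ALL positions whose word
-- already occurred (words.index(w) != i), then delete at the minimal one (simpler decomposition).

-- ===== PORT A =====
-- for index, word in enumerate(a_list): if word in seen: del a_list[index]; return ' '.join(a_list); seen.add(word)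
def aLoop (a_list : List String) : List (Int × String) → PySem.Set String → Option String
  | [], _ => none
  | (i, w) :: rest, seen =>
    if seen.contains w then
      -- del a_list[index]; index comes from enumerate so it is ≥ 0 and in range: eraseIdx is exact here
      some (PySem.Str.join " " (a_list.eraseIdx i.toNat))
    else aLoop a_list rest (PySem.Set.add seen w)

def search_and_remove_2 (a_string : String) : String :=
  match aLoop (PySem.Str.split₀ a_string) (PySem.List.enumerate (PySem.Str.split₀ a_string) 0) PySem.Set.empty with
  | some s => s
  | none => a_string

-- ===== PORT B =====
-- dups = [i for i, w in enumerate(words) if words.index(w) != i]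
-- if not dups: return a_string; i = min(dups); return ' '.join(words[:i] + words[i+1:])
def bDups (words : List String) : List Int :=
  (PySem.List.enumerate words 0).filterMap
    (fun p => if ((PySem.List.index? words p.2).map (fun n => (n : Int))) ≠ some p.1 then some p.1 else none)

def search_and_remove_2_alt (a_string : String) : String :=
  match PySem.List.min? (bDups (PySem.Str.split₀ a_string)) (fun x => x) with
  | none => a_string
  | some i => PySem.Str.join " "
      (PySem.List.slice (PySem.Str.split₀ a_string) none (some i)
        ++ PySem.List.slice (PySem.Str.split₀ a_string) (some (i + 1)) none)

-- ===== PRECONDITION & SPEC =====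
def Spec_search_and_remove_2 (a_string : String) (out : String) : Prop := out = search_and_remove_2_alt a_string
instance (a_string : String) (out : String) : Decidable (Spec_search_and_remove_2 a_string out) := by unfold Spec_search_and_remove_2; infer_instance

-- ===== CLAIM (what is proved, stated in full; the proofs are below) =====
def Claim_equal_search_and_remove_2 : Prop := ∀ (a_string : String), Dom_search_and_remove_2 a_string → Spec_search_and_remove_2 a_string (search_and_remove_2 a_string)

-- ===== LEMMAS AND PROOFS =====

-- membership in enumerate: every element is (j, xs[j])
theorem mem_enumerate_ex {α : Type} (xs : List α) : ∀ (s : Int) (p : Int × α),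
    p ∈ PySem.List.enumerate xs s → ∃ (j : Nat) (hj : j < xs.length), p.1 = s + j ∧ p.2 = xs[j] := by
  induction xs with
  | nil => intro s p h; simp [PySem.List.enumerate_nil] at h
  | cons x t ih =>
    intro s p h
    rw [PySem.List.enumerate_cons] at h
    rw [List.mem_cons] at h
    rcases h with h | h
    · exact ⟨0, by simp, by simp [h]⟩
    · obtain ⟨j, hj, h1, h2⟩ := ih (s + 1) p h
      exact ⟨j + 1, by simpa using hj, by push_cast at h1 ⊢; omega, by simpa using h2⟩

-- the index()-based test is exactly "already occurred in the prefix"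
theorem index_test_iff (words : List String) (j : Nat) (hj : j < words.length) :
    (((PySem.List.index? words words[j]).map (fun n => (n : Int))) ≠ some (j : Int))
      ↔ words[j] ∈ words.take j := by
  have hmem : words[j] ∈ words := List.getElem_mem hj
  obtain ⟨m, hm⟩ := Option.isSome_iff_exists.mp ((PySem.List.index?_isSome_iff words words[j]).mpr hmem)
  obtain ⟨hmlt, hwm, hmin⟩ := PySem.List.getElem_of_index?_eq_some hm
  rw [hm]
  constructor
  · intro hne
    have hmj : m ≠ j := by intro h; apply hne; simp [h]
    have hmle : m ≤ j := by
      by_contra h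
      exact hmin j (by omega) rfl
    have hmlt' : m < j := lt_of_le_of_ne hmle hmj
    have : words[j] = (words.take j)[m]'(by simp; omega) := by
      rw [List.getElem_take]; exact hwm.symm
    rw [this]; exact List.getElem_mem _
  · intro hpre hEq
    have hmj : m = j := by simpa using hEq
    obtain ⟨i, hi, hwi⟩ := List.mem_take_iff_getElem.mp hpre
    exact hmin i (by omega) (by rw [hwi])

-- head? of the if-filterMap comprehension is find? mapped to the index
theorem head?_filterMap_if (words : List String) :
    ∀ (l : List (Int × String)),
      (l.filterMap (fun p => if decide (p.2 ∈ words.take p.1.toNat) then some p.1 else none)).head?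
        = (l.find? (fun p => decide (p.2 ∈ words.take p.1.toNat))).map Prod.fst := by
  intro l
  induction l with
  | nil => simp
  | cons x t ih =>
    by_cases h : x.2 ∈ words.take x.1.toNat
    · simp [List.find?_cons, h]
    · simp only [List.filterMap_cons, List.find?_cons, h, decide_false, if_false,
        Bool.false_eq_true]
      exact ih

-- min of a strictly increasing Int list is its head
theorem min?_id_eq_head? (l : List Int) (h : l.Pairwise (· < ·)) :
    PySem.List.min? l (fun x => x) = l.head? := by
  cases l with
  | nil => simp [PySem.List.min?_eq_none_iff]
  | cons x t =>
    rw [PySem.List.min?_id_cons]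
    have hle := PySem.List.foldl_min_le t x
    have hmem := PySem.List.foldl_min_mem t x
    have hx : ∀ y ∈ t, x < y := by
      intro y hy; exact (List.pairwise_cons.mp h).1 y hy
    rcases hmem with heq | hmemt
    · simp [heq]
    · exact absurd hle.1 (not_le.mpr (hx _ hmemt))

-- the filtered index list inherits strict increase from enumerate
theorem pairwise_filterMap_fst {α : Type} (c : Int × α → Bool) :
    ∀ (l : List (Int × α)), l.Pairwise (fun p q => p.1 < q.1) →
      (l.filterMap (fun p => if c p then some p.1 else none)).Pairwise (· < ·) := by
  intro l
  induction l with
  | nil => intro _; simp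
  | cons p t ih =>
    intro h
    obtain ⟨hhead, htail⟩ := List.pairwise_cons.mp h
    by_cases hc : c p
    · simp only [List.filterMap_cons, hc, if_pos]
      refine List.pairwise_cons.mpr ⟨?_, ih htail⟩
      intro y hy
      obtain ⟨q, hq, hqy⟩ := List.mem_filterMap.mp hy
      have : q.1 = y := by
        by_cases h2 : c q
        · simpa [h2] using hqy
        · simp [h2] at hqy
      rw [← this]; exact hhead q hq
    · simpa [List.filterMap_cons, hc] using ih htail

theorem pairwise_fst_enumerate {α : Type} (xs : List α) (s : Int) :
    (PySem.List.enumerate xs s).Pairwise (fun p q => p.1 < q.1) := by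
  have h1 := PySem.List.map_fst_enumerate xs s
  have h2 := PySem.List.pairwise_lt_pyRange_one s (s + xs.length)
  rw [← h1, List.pairwise_map] at h2
  exact h2

-- A's loop returns the join at the FIRST position whose word occurs in the prefix
theorem aLoop_eq_find (words : List String) : ∀ (rest : List String) (k : Nat) (seen : PySem.Set String),
    words.drop k = rest →
    (∀ w, w ∈ seen ↔ w ∈ words.take k) →
    aLoop words (PySem.List.enumerate rest (k : Int)) seen
      = ((PySem.List.enumerate rest (k : Int)).find?
            (fun p => decide (p.2 ∈ words.take p.1.toNat))).map
          (fun p => PySem.Str.join " " (words.eraseIdx p.1.toNat)) := by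
  intro rest
  induction rest with
  | nil => intro k seen _ _; simp [PySem.List.enumerate_nil, aLoop]
  | cons x rest' ih =>
    intro k seen hdrop hseen
    rw [PySem.List.enumerate_cons]
    have hk : k < words.length := by
      by_contra h
      have := List.drop_eq_nil_of_le (le_of_not_gt h)
      rw [hdrop] at this; exact List.cons_ne_nil _ _ this
    have hx : words[k]? = some x := by
      have : (words.drop k)[0]? = words[k]? := by
        rw [List.getElem?_drop]; simp
      rw [hdrop] at this; simpa using this.symm
    have hcond : seen.contains x = decide (x ∈ words.take k) := by
      simp [hseen]
    rw [aLoop, List.find?_cons]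
    simp only [Int.toNat_natCast, hcond]
    by_cases hc : x ∈ words.take k
    · simp [hc]
    · simp only [hc, decide_false, Option.map]
      have hdrop' : words.drop (k + 1) = rest' := by
        rw [← List.drop_drop, hdrop]; simp
      have htake : words.take (k + 1) = words.take k ++ [x] := by
        rw [List.take_add_one, hx]; rfl
      have hseen' : ∀ w, w ∈ PySem.Set.add seen x ↔ w ∈ words.take (k + 1) := by
        intro w
        rw [PySem.Set.mem_add, htake, List.mem_append, List.mem_singleton, hseen]
      have := ih (k + 1) (PySem.Set.add seen x) hdrop' hseen'
      push_cast at this ⊢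
      exact this

-- ===== VERDICT (by name: the statement is the Claim_ definition above) =====
theorem search_and_remove_2_spec : Claim_equal_search_and_remove_2 := by
  intro a_string _
  unfold Spec_search_and_remove_2 search_and_remove_2 search_and_remove_2_alt
  set words := PySem.Str.split₀ a_string with hwords
  -- rewrite B's comprehension test to prefix membership
  have hdups : bDups words
    = (PySem.List.enumerate words 0).filterMap
      (fun p => if decide (p.2 ∈ words.take p.1.toNat) then some p.1 else none) := by
    unfold bDups
    apply List.filterMap_congr
    intro p hp
    obtain ⟨j, hj, h1, h2⟩ := mem_enumerate_ex words 0 p hp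
    have h1' : p.1 = (j : Int) := by omega
    have := index_test_iff words j hj
    rw [← h1', ← h2] at this
    by_cases hc : ((PySem.List.index? words p.2).map (fun n => (n : Int))) ≠ some p.1
    · rw [if_pos hc, if_pos (by simpa [h1'] using (this.mp hc))]
    · rw [if_neg hc, if_neg]
      simp only [h1', Int.toNat_natCast]
      intro hmem
      exact hc ((by simpa [h1'] using this.mpr (by simpa [h1'] using hmem)))
  rw [hdups]
  -- B's min over the filtered indices is the head, which is A's find?
  have hpair := pairwise_filterMap_fst (fun p => decide (p.2 ∈ words.take p.1.toNat))
      (PySem.List.enumerate words 0) (pairwise_fst_enumerate words 0)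
  rw [min?_id_eq_head? _ hpair]
  rw [head?_filterMap_if words]
  have hA := aLoop_eq_find words words 0 PySem.Set.empty (by simp) (by simp [PySem.Set.empty])
  simp only [Nat.cast_zero] at hA
  rw [hA]
  cases hfind : (PySem.List.enumerate words 0).find? (fun p => decide (p.2 ∈ words.take p.1.toNat)) with
  | none => simp
  | some p =>
    obtain ⟨j, hj, h1, h2⟩ := mem_enumerate_ex words 0 p (List.mem_of_find?_eq_some hfind)
    have h1' : p.1 = (j : Int) := by omega
    simp only [Option.map_some]
    rw [h1', Int.toNat_natCast, List.eraseIdx_eq_take_drop_succ,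
        PySem.List.slice_to_natCast]
    have : ((j : Int) + 1) = ((j + 1 : Nat) : Int) := by push_cast; ring
    rw [this, PySem.List.slice_from_natCast]
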